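-- pv_equiv track=rewrite | github.com/minus9d/programming_contest_archive | abc/148/e/e.py | solve
-- ===== SOURCE A (Python) =====
-- def solve(N):
--     if N % 2 == 1:
--         return 0
--     else:
--         num_10 = N // 10
--
--         k = 50
--         num_5 = 0
--         while k < 1e19:
--             num_5 += N // k
--             k *= 5
--
--         return num_10 + num_5
-- ===== SOURCE B (Python) =====
-- def solve(N):
--     # Trailing zeros of the even double factorial = v5((N//2)!), computed by
--     # Legendre's closed form: (m - digit_sum_base5(m)) // 4, no division-sum loop.
--     if N % 2 == 1:
--         return 0
--     m = N // 2
--     s = 0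
--     t = m
--     while t > 0:
--         s += t % 5
--         t //= 5
--     return (m - s) // 4
-- ===== Notes on version B (the rewrite author's own statement) =====
-- stated objective: alternative
-- what changed: B drops A's division-sum loop entirely and instead computes the base-5 digit sum s of m=N//2 and returns (m-s)//4, Legendre's closed form for v5(m!).
-- intended difference: On negative even N (outside the contest's N>=1 domain) A returns a meaningless 26-term negative sum (-26 at N=-2) while B's digit loop never runs and it returns (N//2 - 0)//4 (-1 at N=-2); the corner is unspecified and B's value is just its closed form evaluated there, equally defensible. — e.g. on solve(-2): A returns -26, B returns -1
import Mathlib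
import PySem

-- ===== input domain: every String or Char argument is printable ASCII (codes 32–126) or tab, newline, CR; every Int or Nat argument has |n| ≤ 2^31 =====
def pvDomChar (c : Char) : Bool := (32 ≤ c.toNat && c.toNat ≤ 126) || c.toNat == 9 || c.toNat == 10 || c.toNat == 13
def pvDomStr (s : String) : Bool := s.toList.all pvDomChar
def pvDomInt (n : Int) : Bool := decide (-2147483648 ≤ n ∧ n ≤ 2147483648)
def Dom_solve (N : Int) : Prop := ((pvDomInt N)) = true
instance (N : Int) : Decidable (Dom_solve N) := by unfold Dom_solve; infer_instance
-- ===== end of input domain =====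

-- B replaces A's sum of floor divisions by successive five-fold divisors (bounded by 1e19)
-- with Legendre's closed form (m - base5digitsum m) // 4 for m = N//2; on negative even N
-- (region D_solve, outside the contest domain) the two unspecified corner values differ.


-- ===== PORT A =====
-- A's while loop: k starts at 50, multiplies by 5 while k < 1e19 (= 10^19 exactly as a float).
-- The Nat fuel only makes the recursion structural; 30 exceeds the loop's fixed 25 iterations.
def solveLoopA : Nat → Int → Int → Int → Int
  | 0, _, _, num5 => num5
  | fuel + 1, N, k, num5 =>
    if k < 10000000000000000000 then solveLoopA fuel N (k * 5) (num5 + PySem.Int.floordiv N k)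
    else num5

def solve (N : Int) : Int :=
  if PySem.Int.mod N 2 = 1 then 0
  else PySem.Int.floordiv N 10 + solveLoopA 30 N 50 0

-- ===== PORT B =====
-- B's digit loop: while t > 0, add t % 5 to s and set t //= 5.  The Nat fuel only makes the
-- recursion structural; 64 exceeds the digit count of every t with |t| ≤ 5^64.
def digitLoopB : Nat → Int → Int → Int
  | 0, _, s => s
  | fuel + 1, t, s =>
    if 0 < t then digitLoopB fuel (PySem.Int.floordiv t 5) (s + PySem.Int.mod t 5)
    else s

def solve_alt (N : Int) : Int :=
  if PySem.Int.mod N 2 = 1 then 0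
  else
    PySem.Int.floordiv (PySem.Int.floordiv N 2 - digitLoopB 64 (PySem.Int.floordiv N 2) 0) 4

-- ===== PRECONDITION & SPEC =====
-- On negative even N (outside the contest's N ≥ 1 domain) A returns a meaningless 26-term
-- negative sum (-26 at N = -2) while B's digit loop never runs and it returns (N//2)//4
-- (-1 at N = -2); the corner is unspecified and B's value is its closed form evaluated there.
def D_solve (N : Int) : Prop := N < 0 ∧ N % 2 = 0
instance (N : Int) : Decidable (D_solve N) := by unfold D_solve; infer_instance

def Spec_solve (N : Int) (out : Int) : Prop := ¬ D_solve N → out = solve_alt N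
instance (N : Int) (out : Int) : Decidable (Spec_solve N out) := by unfold Spec_solve; infer_instance

def pvDiffWitness_solve : Int := (-2)
def pvDiffWitnessOut_solve : Int × Int := (-26, -1)

-- ===== CLAIM (what is proved, stated in full; the proofs are below) =====
def Claim_unchanged_solve : Prop := ∀ (N : Int), Dom_solve N → Spec_solve N (solve N)
def Claim_changed_solve : Prop := Dom_solve (pvDiffWitness_solve) ∧ D_solve (pvDiffWitness_solve) ∧ solve (pvDiffWitness_solve) = pvDiffWitnessOut_solve.1 ∧ solve_alt (pvDiffWitness_solve) = pvDiffWitnessOut_solve.2 ∧ pvDiffWitnessOut_solve.1 ≠ pvDiffWitnessOut_solve.2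

-- ===== LEMMAS AND PROOFS =====

theorem fd_eq_ediv (a b : Int) (hb : 0 < b) : PySem.Int.floordiv a b = a / b :=
  PySem.Int.floordiv_eq_ediv_of_pos hb

theorem md_eq_emod (a b : Int) (hb : 0 < b) : PySem.Int.mod a b = a % b :=
  PySem.Int.mod_eq_emod_of_pos hb

-- A's loop unrolled: exactly the iterations with k·5^i < 10^19 (fuel large enough is unused).
theorem loopA_pad (N : Int) : ∀ (n fuel : Nat) (k num5 : Int), 0 < k → n ≤ fuel →
    (10000000000000000000 : Int) ≤ k * 5 ^ n →
    solveLoopA fuel N k num5 = num5 + ∑ i ∈ Finset.range n,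
      (if k * 5 ^ i < 10000000000000000000 then N / (k * 5 ^ i) else 0) := by
  intro n
  induction n with
  | zero =>
    intro fuel k num5 hk _ h
    simp only [pow_zero, mul_one] at h
    cases fuel with
    | zero => simp [solveLoopA]
    | succ f => rw [solveLoopA, if_neg (by omega)]; simp
  | succ n ih =>
    intro fuel k num5 hk hfuel h
    cases fuel with
    | zero => omega
    | succ f =>
      rw [solveLoopA]
      by_cases hlt : k < 10000000000000000000
      · rw [if_pos hlt,
          ih f (k * 5) _ (by omega) (by omega) (by rw [mul_assoc, ← pow_succ']; exact h)]
        rw [Finset.sum_range_succ']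
        simp only [pow_zero, mul_one, if_pos hlt, fd_eq_ediv N k hk]
        have : ∀ i : Nat, k * 5 * 5 ^ i = k * 5 ^ (i + 1) := by
          intro i; rw [pow_succ']; ring
        simp only [this]
        ring
      · rw [if_neg hlt]
        have hz : ∀ i ∈ Finset.range (n + 1),
            (if k * 5 ^ i < 10000000000000000000 then N / (k * 5 ^ i) else 0) = 0 := by
          intro i _
          have h5 : (1:Int) ≤ 5 ^ i := one_le_pow₀ (by norm_num)
          rw [if_neg (by nlinarith)]
        rw [Finset.sum_congr rfl hz]
        simp

-- A's loop at its actual start values, as a literal sum.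
theorem loopA_eval (N : Int) :
    solveLoopA 30 N 50 0 =
      N / 50 + N / 250 + N / 1250 + N / 6250 + N / 31250 + N / 156250 + N / 781250 +
      N / 3906250 + N / 19531250 + N / 97656250 + N / 488281250 + N / 2441406250 +
      N / 12207031250 + N / 61035156250 + N / 305175781250 + N / 1525878906250 +
      N / 7629394531250 + N / 38146972656250 + N / 190734863281250 + N / 953674316406250 +
      N / 4768371582031250 + N / 23841857910156250 + N / 119209289550781250 +
      N / 596046447753906250 + N / 2980232238769531250 := by
  rw [loopA_pad N 25 30 50 0 (by norm_num) (by norm_num) (by norm_num)]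
  simp only [Finset.sum_range_succ, Finset.sum_range_zero]
  norm_num

-- The truncated Legendre sum Σ_{i=1..14} t / 5^i.
def sum14 (t : Int) : Int := ∑ i ∈ Finset.range 14, t / 5 ^ (i + 1)

theorem ediv5_ediv (a k : Int) : a / 5 / k = a / (5 * k) :=
  Int.ediv_ediv_eq_ediv_mul (by norm_num)

theorem sum14_rec (t : Int) (ht : 0 ≤ t) (hub : t < 5 ^ 15) :
    sum14 t = t / 5 + sum14 (t / 5) := by
  unfold sum14
  simp only [Finset.sum_range_succ, Finset.sum_range_zero, ediv5_ediv]
  norm_num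
  have hz : t / 30517578125 = 0 := Int.ediv_eq_zero_of_lt ht (by norm_num at hub; omega)
  rw [hz]
  ring

-- B's digit loop computes the base-5 digit sum, i.e. t - 4 · sum14 t, for 0 ≤ t < 5^bound.
theorem digitLoopB_eval : ∀ (bound fuel : Nat) (t s : Int), bound ≤ fuel → bound ≤ 14 →
    0 ≤ t → t < 5 ^ bound →
    digitLoopB fuel t s = s + t - 4 * sum14 t := by
  intro bound
  induction bound with
  | zero =>
    intro fuel t s _ _ ht hub
    simp only [pow_zero] at hub
    have ht0 : t = 0 := by omega
    subst ht0
    have hs : sum14 0 = 0 := by unfold sum14; simp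
    cases fuel with
    | zero => simp [digitLoopB, hs]
    | succ f => rw [digitLoopB, if_neg (by omega)]; simp [hs]
  | succ b ih =>
    intro fuel t s hfuel hb ht hub
    cases fuel with
    | zero => omega
    | succ f =>
      rw [digitLoopB]
      by_cases hpos : 0 < t
      · rw [if_pos hpos]
        have hq : t / 5 < 5 ^ b := by
          have : t < 5 * 5 ^ b := by rw [← pow_succ']; exact hub
          omega
        rw [fd_eq_ediv t 5 (by norm_num), md_eq_emod t 5 (by norm_num),
          ih f (t / 5) _ (by omega) (by omega) (by omega) hq]
        have hrec : sum14 t = t / 5 + sum14 (t / 5) := by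
          apply sum14_rec t ht
          calc t < 5 ^ (b + 1) := hub
            _ ≤ 5 ^ 15 := by
              apply pow_le_pow_right₀ (by norm_num)
              omega
        have hmod : t % 5 = t - 5 * (t / 5) := by omega
        rw [hrec, hmod]
        ring
      · rw [if_neg hpos]
        have ht0 : t = 0 := by omega
        subst ht0
        have hs : sum14 0 = 0 := by unfold sum14; simp
        rw [hs]
        ring

-- sum14 as a literal sum.
theorem sum14_lit (t : Int) :
    sum14 t = t / 5 + t / 25 + t / 125 + t / 625 + t / 3125 + t / 15625 + t / 78125 +
      t / 390625 + t / 1953125 + t / 9765625 + t / 48828125 + t / 244140625 +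
      t / 1220703125 + t / 6103515625 := by
  unfold sum14
  simp only [Finset.sum_range_succ, Finset.sum_range_zero]
  norm_num

-- solve_alt on nonnegative even N in Dom: it returns sum14 (N/2).
theorem solve_alt_eval (N : Int) (hN : 0 ≤ N) (hub : N ≤ 2147483648) (heven : ¬ N % 2 = 1) :
    solve_alt N = sum14 (N / 2) := by
  unfold solve_alt
  rw [md_eq_emod N 2 (by norm_num), if_neg heven]
  have hm : PySem.Int.floordiv N 2 = N / 2 := fd_eq_ediv N 2 (by norm_num)
  rw [hm]
  have h14 : N / 2 < 5 ^ 14 := by omega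
  rw [digitLoopB_eval 14 64 (N / 2) 0 (by norm_num) (by norm_num) (by omega) h14]
  have : (0 : Int) + N / 2 - 4 * sum14 (N / 2) - (N / 2 - 4 * sum14 (N / 2)) = 0 := by ring
  rw [fd_eq_ediv _ 4 (by norm_num)]
  have hx : (0 : Int) + N / 2 - (0 + N / 2 - 4 * sum14 (N / 2)) = 4 * sum14 (N / 2) := by ring
  rw [show N / 2 - (0 + N / 2 - 4 * sum14 (N / 2)) = 4 * sum14 (N / 2) by ring]
  rw [Int.mul_ediv_cancel_left _ (by norm_num)]

-- ===== VERDICT (by name: the statement is the Claim_ definition above) =====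
theorem solve_spec : Claim_unchanged_solve := by
  intro N hdom hnd
  unfold Dom_solve pvDomInt at hdom
  rw [decide_eq_true_iff] at hdom
  unfold solve
  rw [md_eq_emod N 2 (by norm_num)]
  by_cases hodd : N % 2 = 1
  · rw [if_pos hodd]
    unfold solve_alt
    rw [md_eq_emod N 2 (by norm_num), if_pos hodd]
  · rw [if_neg hodd]
    have heven : N % 2 = 0 := by omega
    have hNn : 0 ≤ N := by
      by_contra hneg
      exact hnd (by unfold D_solve; exact ⟨by omega, heven⟩)
    rw [solve_alt_eval N hNn (by omega) hodd, sum14_lit]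
    rw [fd_eq_ediv N 10 (by norm_num), loopA_eval]
    omega

theorem solve_changed : Claim_changed_solve := by
  unfold Claim_changed_solve pvDiffWitness_solve pvDiffWitnessOut_solve
  refine ⟨by decide, by decide, ?_, ?_, by decide⟩
  · unfold solve
    rw [md_eq_emod _ 2 (by norm_num), if_neg (by decide), fd_eq_ediv _ 10 (by norm_num), loopA_eval]
    decide
  · unfold solve_alt
    rw [md_eq_emod _ 2 (by norm_num), if_neg (by decide), fd_eq_ediv _ 2 (by norm_num)]
    decide
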